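-- pv_equiv track=rewrite | github.com/missioncontrol-ai/missioncontrol | backend/app/services/slack.py | command_mission_id
-- ===== SOURCE A (Python) =====
-- def command_mission_id(text: str | None, explicit_mission_id: str | None = None) -> str | None:
--     if explicit_mission_id and explicit_mission_id.strip():
--         return explicit_mission_id.strip()
--     value = (text or "").strip()
--     if not value:
--         return None
--     for token in value.split():
--         if token.startswith("mission_id="):
--             mission_id = token.split("=", 1)[1].strip()
--             return mission_id or None
--     return None
-- ===== SOURCE B (Python) =====
-- def command_mission_id(text, explicit_mission_id=None):
--     if explicit_mission_id:
--         stripped = explicit_mission_id.strip()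
--         if stripped:
--             return stripped
--     s = text or ""
--     n = len(s)
--     i = 0
--     while i < n:
--         if (i == 0 or s[i - 1].isspace()) and s.startswith("mission_id=", i):
--             j = i + len("mission_id=")
--             k = j
--             while k < n and not s[k].isspace():
--                 k += 1
--             return s[j:k] or None
--         i += 1
--     return None
-- ===== Notes on version B (the rewrite author's own statement) =====
-- stated objective: alternative
-- what changed: A strips the text, builds the whitespace-token list and loops over it, re-splitting the matching token at the first equals sign; B performs a single character-level scan with a token-boundary flag and captures the value up to the next whitespace, building no token list.
import Mathlib
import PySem

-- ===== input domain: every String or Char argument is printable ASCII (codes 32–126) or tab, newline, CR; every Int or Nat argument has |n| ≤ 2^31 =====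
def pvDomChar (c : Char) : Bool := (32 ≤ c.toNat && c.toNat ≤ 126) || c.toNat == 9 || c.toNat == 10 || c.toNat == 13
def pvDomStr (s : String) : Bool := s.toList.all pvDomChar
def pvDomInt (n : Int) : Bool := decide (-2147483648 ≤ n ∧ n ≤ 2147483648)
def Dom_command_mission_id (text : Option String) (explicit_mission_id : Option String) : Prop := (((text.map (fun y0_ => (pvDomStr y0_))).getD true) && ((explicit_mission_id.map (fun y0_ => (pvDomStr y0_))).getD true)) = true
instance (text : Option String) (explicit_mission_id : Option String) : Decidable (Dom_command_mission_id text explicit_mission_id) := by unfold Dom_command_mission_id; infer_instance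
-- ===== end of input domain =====

-- B replaces A's strip + whitespace-split + token loop by a single left-to-right character
-- scan (boundary flag + prefix test + capture-to-whitespace); same return value, no token list built.

-- ===== PORT A =====
-- 'for token in value.split(): …' as structural recursion over the token list
def pvALoop : List String → Option String
  | [] => none
  | t :: rest =>
    if PySem.Str.startswith t "mission_id=" then
      -- token.split("=", 1)[1]: pyGet? = none would be Python's IndexError; it is
      -- unreachable here because the token starts with "mission_id=" (contains '=')
      match PySem.List.pyGet? ((PySem.Str.splitMax? t "=" 1).getD []) 1 with
      | some raw =>
        let mission_id := PySem.Str.strip raw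
        if mission_id ≠ "" then some mission_id else none
      | none => none
    else pvALoop rest

def pvABody (text : Option String) : Option String :=
  let value := PySem.Str.strip (text.getD "")
  if value = "" then none
  else pvALoop (PySem.Str.split₀ value)

def command_mission_id (text : Option String) (explicit_mission_id : Option String) : Option String :=
  match explicit_mission_id with
  | some e => if e ≠ "" ∧ PySem.Str.strip e ≠ "" then some (PySem.Str.strip e) else pvABody text
  | none => pvABody text

-- ===== PORT B =====
-- the inner 'while k < n and not s[k].isspace(): k += 1' + 's[j:k]' capture, as the
-- structural recursion of that loop (collect characters until whitespace)
def pvBCapture : List Char → List Char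
  | [] => []
  | c :: rest => if PySem.Chars.isspace c then [] else c :: pvBCapture rest

-- the outer 'while i < n: …; i += 1' scan; atStart carries 'i == 0 or s[i-1].isspace()'
def pvBScan : List Char → Bool → Option String
  | [], _ => none
  | c :: rest, atStart =>
    if atStart && PySem.Chars.startswith (c :: rest) ("mission_id=".toList) then
      let cap := pvBCapture ((c :: rest).drop 11)
      if cap.isEmpty then none else some (String.ofList cap)
    else pvBScan rest (PySem.Chars.isspace c)

def command_mission_id_alt (text : Option String) (explicit_mission_id : Option String) : Option String :=
  match explicit_mission_id with
  | some e =>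
    if e ≠ "" then
      let stripped := PySem.Str.strip e
      if stripped ≠ "" then some stripped else pvBScan (text.getD "").toList true
    else pvBScan (text.getD "").toList true
  | none => pvBScan (text.getD "").toList true

-- ===== PRECONDITION & SPEC =====
def Spec_command_mission_id (text : Option String) (explicit_mission_id : Option String) (out : Option String) : Prop := out = command_mission_id_alt text explicit_mission_id
instance (text : Option String) (explicit_mission_id : Option String) (out : Option String) : Decidable (Spec_command_mission_id text explicit_mission_id out) := by unfold Spec_command_mission_id; infer_instance

-- ===== CLAIM (what is proved, stated in full; the proofs are below) =====
def Claim_equal_command_mission_id : Prop := ∀ (text : Option String) (explicit_mission_id : Option String), Dom_command_mission_id text explicit_mission_id → Spec_command_mission_id text explicit_mission_id (command_mission_id text explicit_mission_id)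

-- ===== LEMMAS AND PROOFS =====

-- head of dropWhile fails the predicate
theorem pv_dropWhile_head {α : Type} (p : α → Bool) :
    ∀ (l : List α) (c : α) (r : List α), List.dropWhile p l = c :: r → p c = false := by
  intro l
  induction l with
  | nil => intro c r h; simp [List.dropWhile] at h
  | cons a t ih =>
    intro c r h
    by_cases ha : p a
    · exact ih c r (by simpa [List.dropWhile, ha] using h)
    · simp [List.dropWhile, ha] at h
      simp [← h.1, ha]

-- whitespace tokenization of a char list (the clean recursive form of str.split())
def pvTokens (cs : List Char) : List (List Char) :=
  match h : cs.dropWhile PySem.Chars.isspace with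
  | [] => []
  | c :: r =>
    (c :: r).takeWhile (fun x => !PySem.Chars.isspace x) ::
      pvTokens ((c :: r).dropWhile (fun x => !PySem.Chars.isspace x))
termination_by cs.length
decreasing_by
  have h1 : (c :: r).length ≤ cs.length := h ▸ List.length_dropWhile_le _ cs
  have hc : PySem.Chars.isspace c = false := pv_dropWhile_head _ cs c r h
  have h2 : ((c :: r).dropWhile (fun x => !PySem.Chars.isspace x)).length ≤ r.length := by
    simp [List.dropWhile, hc]
    exact List.length_dropWhile_le _ r
  simp only [List.length_cons] at h1
  omega

theorem pvTokens_eq_nil {cs : List Char} (h : cs.dropWhile PySem.Chars.isspace = []) :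
    pvTokens cs = [] := by
  rw [pvTokens]; split
  · rfl
  · rename_i c r heq; rw [h] at heq; cases heq

theorem pvTokens_nil : pvTokens [] = [] := pvTokens_eq_nil rfl

theorem pvTokens_eq_cons {cs : List Char} {c : Char} {r : List Char}
    (h : cs.dropWhile PySem.Chars.isspace = c :: r) :
    pvTokens cs = (c :: r).takeWhile (fun x => !PySem.Chars.isspace x) ::
      pvTokens ((c :: r).dropWhile (fun x => !PySem.Chars.isspace x)) := by
  rw [pvTokens]; split
  · rename_i heq; rw [h] at heq; cases heq
  · rename_i c' r' heq; rw [h] at heq; cases heq; rfl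

theorem pvTokens_cons_space {c : Char} {rest : List Char} (h : PySem.Chars.isspace c = true) :
    pvTokens (c :: rest) = pvTokens rest := by
  have hd : (c :: rest).dropWhile PySem.Chars.isspace = rest.dropWhile PySem.Chars.isspace := by
    simp [List.dropWhile, h]
  cases h2 : rest.dropWhile PySem.Chars.isspace with
  | nil => rw [pvTokens_eq_nil (by rw [hd, h2]), pvTokens_eq_nil h2]
  | cons d r => rw [pvTokens_eq_cons (by rw [hd, h2]), pvTokens_eq_cons h2]

theorem pvTokens_cons_nonspace {c : Char} {rest : List Char} (h : PySem.Chars.isspace c = false) :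
    pvTokens (c :: rest) =
      ((c :: rest).takeWhile (fun x => !PySem.Chars.isspace x)) ::
        pvTokens ((c :: rest).dropWhile (fun x => !PySem.Chars.isspace x)) :=
  pvTokens_eq_cons (by simp [List.dropWhile, h])

-- first token starting with "mission_id=" → the part after '=' (empty → none)
def pvF : List (List Char) → Option String
  | [] => none
  | t :: rest =>
    if "mission_id=".toList <+: t then
      (if t.drop 11 = [] then none else some (String.ofList (t.drop 11)))
    else pvF rest

theorem pv_capture_eq (l : List Char) :
    pvBCapture l = l.takeWhile (fun c => !PySem.Chars.isspace c) := by
  induction l with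
  | nil => rfl
  | cons c r ih =>
    simp only [pvBCapture, List.takeWhile_cons]
    by_cases h : PySem.Chars.isspace c <;> simp [h, ih]

theorem pv_split_go_spec :
    ∀ (cs : List Char) (cur : List Char) (acc : List (List Char)),
      PySem.Chars.split₀.go cs cur acc =
        acc.reverse ++
          (if cur.isEmpty then pvTokens cs
           else (cur.reverse ++ cs.takeWhile (fun x => !PySem.Chars.isspace x)) ::
                  pvTokens (cs.dropWhile (fun x => !PySem.Chars.isspace x))) := by
  intro cs
  induction cs with
  | nil =>
    intro cur acc
    cases cur with
    | nil => simp [PySem.Chars.split₀.go, pvTokens_nil]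
    | cons a b => simp [PySem.Chars.split₀.go, pvTokens_nil]
  | cons c rest ih =>
    intro cur acc
    by_cases hc : PySem.Chars.isspace c
    · cases cur with
      | nil =>
        simp only [PySem.Chars.split₀.go, hc, if_true, List.isEmpty_nil]
        rw [ih [] acc]
        simp [pvTokens_cons_space hc]
      | cons a b =>
        simp only [PySem.Chars.split₀.go, hc, if_true, List.isEmpty_cons]
        rw [ih [] ((a :: b).reverse :: acc)]
        simp [pvTokens_cons_space hc, List.dropWhile, hc]
    · have hc' : PySem.Chars.isspace c = false := by simpa using hc
      simp only [PySem.Chars.split₀.go, hc', Bool.false_eq_true, if_false]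
      rw [ih (c :: cur) acc]
      cases cur with
      | nil =>
        simp [pvTokens_cons_nonspace hc', List.dropWhile, hc']
      | cons a b =>
        simp [List.dropWhile, hc']

theorem pv_split₀_eq (cs : List Char) : PySem.Chars.split₀ cs = pvTokens cs := by
  simpa using pv_split_go_spec cs [] []

theorem pvTokens_all_space {cs : List Char} (h : ∀ c ∈ cs, PySem.Chars.isspace c = true) :
    pvTokens cs = [] :=
  pvTokens_eq_nil (List.dropWhile_eq_nil_iff.mpr h)

theorem pvTokens_append_space :
    ∀ (n : Nat) (cs w : List Char), cs.length ≤ n → (∀ c ∈ w, PySem.Chars.isspace c = true) →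
      pvTokens (cs ++ w) = pvTokens cs := by
  intro n
  induction n with
  | zero =>
    intro cs w hn hw
    have : cs = [] := List.length_eq_zero_iff.mp (Nat.le_zero.mp hn)
    subst this
    simp [pvTokens_all_space hw, pvTokens_nil]
  | succ n ih =>
    intro cs w hn hw
    cases hd : cs.dropWhile PySem.Chars.isspace with
    | nil =>
      have hall : ∀ c ∈ cs, PySem.Chars.isspace c = true := List.dropWhile_eq_nil_iff.mp hd
      rw [pvTokens_eq_nil hd, pvTokens_all_space (by
        intro c hc
        rcases List.mem_append.mp hc with h | h
        · exact hall c h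
        · exact hw c h)]
    | cons c r =>
      have hc : PySem.Chars.isspace c = false := pv_dropWhile_head _ cs c r hd
      have hdrop : (cs ++ w).dropWhile PySem.Chars.isspace = (c :: r) ++ w := by
        rw [List.dropWhile_append, hd]; simp
      have hlen : (c :: r).length ≤ cs.length := hd ▸ List.length_dropWhile_le _ cs
      rw [pvTokens_eq_cons hd, pvTokens_eq_cons hdrop]
      simp only [List.append_eq, ← List.cons_append]
      cases hd2 : (c :: r).dropWhile (fun x => !PySem.Chars.isspace x) with
      | nil =>
        -- the whole remainder c :: r is one token; w is trailing whitespace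
        have hallns : ∀ x ∈ (c :: r), (fun x => !PySem.Chars.isspace x) x = true :=
          List.dropWhile_eq_nil_iff.mp hd2
        have htake : (c :: r).takeWhile (fun x => !PySem.Chars.isspace x) = c :: r :=
          List.takeWhile_eq_self_iff.mpr hallns
        have htakew : w.takeWhile (fun x => !PySem.Chars.isspace x) = [] := by
          cases w with
          | nil => rfl
          | cons d r2 => simp [hw d (by simp)]
        rw [List.takeWhile_append, htake]
        simp only [List.length_cons]
        rw [if_pos trivial]
        rw [List.dropWhile_append, hd2]
        simp only [List.isEmpty_nil, if_true]
        rw [htakew, pvTokens_nil,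
          pvTokens_all_space (by
            intro x hx
            exact hw x ((List.dropWhile_sublist (p := fun x => !PySem.Chars.isspace x) (l := w)).mem hx))]
        simp
      | cons d r2 =>
        have htake2 : ((c :: r) ++ w).takeWhile (fun x => !PySem.Chars.isspace x) =
            (c :: r).takeWhile (fun x => !PySem.Chars.isspace x) := by
          rw [List.takeWhile_append]
          split
          · rename_i hlen2
            have heq : (c :: r).takeWhile (fun x => !PySem.Chars.isspace x) = c :: r :=
              (List.takeWhile_prefix _).eq_of_length hlen2
            have : (c :: r).dropWhile (fun x => !PySem.Chars.isspace x) = [] := by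
              apply List.dropWhile_eq_nil_iff.mpr
              intro x hx
              exact List.mem_takeWhile_imp (x := x) (by rw [heq]; exact hx)
            rw [this] at hd2; cases hd2
          · rfl
        have hdrop2 : ((c :: r) ++ w).dropWhile (fun x => !PySem.Chars.isspace x) =
            (c :: r).dropWhile (fun x => !PySem.Chars.isspace x) ++ w := by
          rw [List.dropWhile_append, hd2]; simp
        rw [htake2, hdrop2, hd2]
        have hlen3 : (d :: r2).length ≤ r.length := by
          have h4 : (c :: r).dropWhile (fun x => !PySem.Chars.isspace x) =
              r.dropWhile (fun x => !PySem.Chars.isspace x) := by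
            simp [List.dropWhile, hc]
          rw [h4] at hd2
          exact hd2 ▸ List.length_dropWhile_le _ r
        rw [ih (d :: r2) w (by simp only [List.length_cons] at hlen hlen3 ⊢; omega) hw]

theorem pvTokens_strip (cs : List Char) : pvTokens (PySem.Chars.strip cs) = pvTokens cs := by
  have h1 : pvTokens (cs.dropWhile PySem.Chars.isspace) = pvTokens cs := by
    cases hd : cs.dropWhile PySem.Chars.isspace with
    | nil => rw [pvTokens_nil, pvTokens_eq_nil hd]
    | cons c r =>
      have hc : PySem.Chars.isspace c = false := pv_dropWhile_head _ cs c r hd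
      rw [pvTokens_eq_cons (show (c :: r).dropWhile PySem.Chars.isspace = c :: r by
        simp [List.dropWhile, hc]), pvTokens_eq_cons hd]
  set u := cs.dropWhile PySem.Chars.isspace with hu
  have hdecomp : (u.reverse.dropWhile PySem.Chars.isspace).reverse ++
      (u.reverse.takeWhile PySem.Chars.isspace).reverse = u := by
    conv_rhs => rw [← List.reverse_reverse u,
      ← List.takeWhile_append_dropWhile (p := PySem.Chars.isspace) (l := u.reverse)]
    rw [List.reverse_append]
  have hw : ∀ c ∈ (u.reverse.takeWhile PySem.Chars.isspace).reverse, PySem.Chars.isspace c = true := by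
    intro x hx
    rw [List.mem_reverse] at hx
    exact List.mem_takeWhile_imp hx
  have h2 := pvTokens_append_space ((u.reverse.dropWhile PySem.Chars.isspace).reverse).length
    ((u.reverse.dropWhile PySem.Chars.isspace).reverse)
    ((u.reverse.takeWhile PySem.Chars.isspace).reverse) le_rfl hw
  rw [hdecomp] at h2
  have hstrip : PySem.Chars.strip cs = (u.reverse.dropWhile PySem.Chars.isspace).reverse := rfl
  rw [hstrip, ← h2, h1]

theorem pvTokens_nonspace :
    ∀ (n : Nat) (cs : List Char), cs.length ≤ n →
      ∀ t ∈ pvTokens cs, ∀ c ∈ t, PySem.Chars.isspace c = false := by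
  intro n
  induction n with
  | zero =>
    intro cs hn t ht
    have : cs = [] := List.length_eq_zero_iff.mp (Nat.le_zero.mp hn)
    subst this
    rw [pvTokens_nil] at ht
    cases ht
  | succ n ih =>
    intro cs hn t ht c hc
    cases hd : cs.dropWhile PySem.Chars.isspace with
    | nil => rw [pvTokens_eq_nil hd] at ht; cases ht
    | cons d r =>
      have hdns : PySem.Chars.isspace d = false := pv_dropWhile_head _ cs d r hd
      rw [pvTokens_eq_cons hd] at ht
      rcases List.mem_cons.mp ht with h | h
      · subst h
        have := List.mem_takeWhile_imp hc
        simpa using this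
      · have hlen : (d :: r).length ≤ cs.length := hd ▸ List.length_dropWhile_le _ cs
        have hdd : (d :: r).dropWhile (fun x => !PySem.Chars.isspace x) =
            r.dropWhile (fun x => !PySem.Chars.isspace x) := by
          simp [List.dropWhile, hdns]
        have hlen2 : ((d :: r).dropWhile (fun x => !PySem.Chars.isspace x)).length ≤ n := by
          rw [hdd]
          have := List.length_dropWhile_le (fun x => !PySem.Chars.isspace x) r
          simp only [List.length_cons] at hlen
          omega
        exact ih _ hlen2 t h c hc

-- splitOnMax.go on sep "=" : skipping the fixed non-'=' prefix
theorem pv_go_zero (f : Nat) (l cur : List Char) (acc : List (List Char)) :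
    PySem.Chars.splitOnMax.go ['='] f 0 l cur acc = ((cur.reverse ++ l) :: acc).reverse := by
  cases f with
  | zero => simp [PySem.Chars.splitOnMax.go]
  | succ f =>
    cases l with
    | nil => simp [PySem.Chars.splitOnMax.go]
    | cons c r => simp [PySem.Chars.splitOnMax.go]

theorem pv_go_skip :
    ∀ (u : List Char) (f : Nat) (l cur : List Char) (acc : List (List Char)),
      (∀ c ∈ u, ¬ c = '=') → u.length ≤ f →
      PySem.Chars.splitOnMax.go ['='] f 1 (u ++ l) cur acc =
        PySem.Chars.splitOnMax.go ['='] (f - u.length) 1 l (u.reverse ++ cur) acc := by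
  intro u
  induction u with
  | nil =>
    intro f l cur acc _ _
    simp only [List.length_nil, Nat.sub_zero, List.nil_append, List.reverse_nil]
  | cons c u' ih =>
    intro f l cur acc hne hf
    cases f with
    | zero => simp at hf
    | succ f =>
      have hc : (c = '=') = False := by simp [hne c (by simp)]
      have hpre : List.isPrefixOf ['='] (c :: (u' ++ l)) = false := by
        rw [Bool.eq_false_iff]
        intro hx
        have := (List.cons_prefix_cons.mp (List.isPrefixOf_iff_prefix.mp hx)).1
        exact hne c (by simp) this.symm
      have step : PySem.Chars.splitOnMax.go ['='] (f + 1) 1 ((c :: u') ++ l) cur acc =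
          PySem.Chars.splitOnMax.go ['='] f 1 (u' ++ l) (c :: cur) acc := by
        simp [PySem.Chars.splitOnMax.go, hpre]
      rw [step, ih f l (c :: cur) acc (by intro x hx; exact hne x (by simp [hx])) (by simp at hf; omega)]
      congr 1
      · simp only [List.length_cons]; omega
      · simp

theorem pv_go_sep (f : Nat) (rest cur : List Char) (acc : List (List Char)) :
    PySem.Chars.splitOnMax.go ['='] (f + 1) 1 ('=' :: rest) cur acc =
      PySem.Chars.splitOnMax.go ['='] f 0 rest [] (cur.reverse :: acc) := by
  simp [PySem.Chars.splitOnMax.go, List.isPrefixOf]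

theorem pv_splitOnMax_token (tail : List Char) :
    PySem.Chars.splitOnMax ("mission_id=".toList ++ tail) ['='] 1 =
      ["mission_id".toList, tail] := by
  have hsplit : "mission_id=".toList ++ tail = "mission_id".toList ++ ('=' :: tail) := by
    simp
  have hPm : ("mission_id".toList) = ['m','i','s','s','i','o','n','_','i','d'] := rfl
  unfold PySem.Chars.splitOnMax
  rw [if_neg (by omega), show ((1 : Int).toNat) = 1 from rfl, hsplit]
  rw [pv_go_skip "mission_id".toList _ ('=' :: tail) [] []
    (by
      intro c hc
      simp only [hPm, List.mem_cons] at hc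
      rcases hc with h|h|h|h|h|h|h|h|h|h|h <;> first | (subst h; decide) | cases h)
    (by simp only [List.length_append, List.length_cons]; omega)]
  have hf : ("mission_id".toList ++ '=' :: tail).length + 1 - ("mission_id".toList).length
      = tail.length + 1 + 1 := by
    simp only [List.length_append, List.length_cons]
    omega
  rw [hf, pv_go_sep, pv_go_zero]
  simp

-- strip is the identity on a list without whitespace
theorem pv_strip_nonspace {l : List Char} (h : ∀ c ∈ l, PySem.Chars.isspace c = false) :
    PySem.Chars.strip l = l := by
  have hdrop : ∀ (m : List Char), (∀ c ∈ m, PySem.Chars.isspace c = false) →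
      m.dropWhile PySem.Chars.isspace = m := by
    intro m hm
    cases m with
    | nil => rfl
    | cons a b => simp [List.dropWhile, hm a (by simp)]
  unfold PySem.Chars.strip PySem.Chars.lstrip PySem.Chars.rstrip
  rw [hdrop l h, hdrop l.reverse (by intro c hc; exact h c (List.mem_reverse.mp hc)), List.reverse_reverse]

theorem pv_ofList_eq_empty_iff (l : List Char) : String.ofList l = "" ↔ l = [] := by
  constructor
  · intro h
    have := congrArg String.toList h
    simpa using this
  · intro h; subst h; rfl

theorem pv_aLoop_eq_F :
    ∀ (toks : List (List Char)),
      (∀ t ∈ toks, ∀ c ∈ t, PySem.Chars.isspace c = false) →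
      pvALoop (toks.map String.ofList) = pvF toks := by
  intro toks
  induction toks with
  | nil => intro _; rfl
  | cons t rest ih =>
    intro hns
    simp only [List.map_cons, pvALoop, pvF]
    have hsw : PySem.Str.startswith (String.ofList t) "mission_id=" =
        List.isPrefixOf ("mission_id=".toList) t := by
      simp [PySem.Str.startswith, PySem.Chars.startswith]
    by_cases hp : "mission_id=".toList <+: t
    · obtain ⟨tail, htail⟩ := hp
      have htailns : ∀ c ∈ tail, PySem.Chars.isspace c = false := by
        intro c hc
        exact hns t (by simp) c (by rw [← htail]; exact List.mem_append_right _ hc)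
      have hsw' : PySem.Str.startswith (String.ofList t) "mission_id=" = true := by
        rw [hsw, List.isPrefixOf_iff_prefix]
        exact ⟨tail, htail⟩
      have hchars : PySem.Chars.splitMax? t ['='] 1 = some ["mission_id".toList, tail] := by
        unfold PySem.Chars.splitMax?
        rw [if_neg (by simp), ← htail, pv_splitOnMax_token]
      have hsplit : PySem.Str.splitMax? (String.ofList t) "=" 1 =
          some [String.ofList "mission_id".toList, String.ofList tail] := by
        simp only [PySem.Str.splitMax?, String.toList_ofList]
        rw [show ("=".toList) = ['='] from rfl, hchars]
        rfl
      rw [hsw', if_pos rfl, hsplit]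
      have hget : PySem.List.pyGet?
          [String.ofList ("mission_id".toList), String.ofList tail] (1 : Int) =
          some (String.ofList tail) := by
        simp [PySem.List.pyGet?, PySem.List.pyIdx?]
      simp only [Option.getD_some, hget]
      have hstrip : PySem.Str.strip (String.ofList tail) = String.ofList tail := by
        simp only [PySem.Str.strip, String.toList_ofList, pv_strip_nonspace htailns]
      have hdrop : t.drop 11 = tail := by
        rw [← htail]
        have : ("mission_id=".toList).length = 11 := by decide
        rw [← this, List.drop_left]
      rw [if_pos (show "mission_id=".toList <+: t from ⟨tail, htail⟩), hdrop]
      by_cases htl : tail = []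
      · subst htl
        simp [hstrip]
      · rw [if_neg htl]
        simp only [hstrip]
        rw [if_pos (by simpa [pv_ofList_eq_empty_iff] using htl)]
    · have hsw' : PySem.Str.startswith (String.ofList t) "mission_id=" = false := by
        rw [hsw]
        by_contra h
        exact hp (List.isPrefixOf_iff_prefix.mp (by simpa using h))
      rw [hsw', if_neg (by simp), if_neg hp]
      exact ih (by intro t' ht' c hc; exact hns t' (by simp [ht']) c hc)

-- scan lemmas
theorem pv_not_startswith {c : Char} (r : List Char) (h : c ≠ 'm') :
    PySem.Chars.startswith (c :: r) ("mission_id=".toList) = false := by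
  simp only [PySem.Chars.startswith]
  rw [Bool.eq_false_iff]
  intro hx
  have hpre := List.isPrefixOf_iff_prefix.mp hx
  rw [show ("mission_id=".toList) = 'm' :: "ission_id=".toList from rfl] at hpre
  exact h ((List.cons_prefix_cons.mp hpre).1).symm

theorem pv_scan_space {c : Char} {r : List Char} (b : Bool) (h : PySem.Chars.isspace c = true) :
    pvBScan (c :: r) b = pvBScan r true := by
  have hcm : c ≠ 'm' := by
    intro e; subst e
    exact absurd h (by decide)
  simp only [pvBScan]
  rw [pv_not_startswith r hcm]
  simp [h]

theorem pv_scan_run :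
    ∀ (u : List Char) (r : List Char), (∀ c ∈ u, PySem.Chars.isspace c = false) →
      pvBScan (u ++ r) false = pvBScan r false := by
  intro u
  induction u with
  | nil => intro r _; rfl
  | cons c u' ih =>
    intro r h
    have hc : PySem.Chars.isspace c = false := h c (by simp)
    rw [List.cons_append]
    show pvBScan (c :: (u' ++ r)) false = pvBScan r false
    simp only [pvBScan, Bool.false_and, Bool.false_eq_true, if_false, hc]
    exact ih r (by intro x hx; exact h x (by simp [hx]))

theorem pv_scan_false_boundary (r : List Char)
    (h : r = [] ∨ ∃ d r', r = d :: r' ∧ PySem.Chars.isspace d = true) :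
    pvBScan r false = pvBScan r true := by
  rcases h with h | ⟨d, r', h, hd⟩
  · subst h; rfl
  · subst h
    rw [pv_scan_space false hd, pv_scan_space true hd]

theorem pv_scan_eq_F :
    ∀ (n : Nat) (cs : List Char), cs.length ≤ n → pvBScan cs true = pvF (pvTokens cs) := by
  intro n
  induction n with
  | zero =>
    intro cs hn
    have : cs = [] := List.length_eq_zero_iff.mp (Nat.le_zero.mp hn)
    subst this
    rw [pvTokens_nil]; rfl
  | succ n ih =>
    intro cs hn
    cases cs with
    | nil => rw [pvTokens_nil]; rfl
    | cons c r =>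
      by_cases hc : PySem.Chars.isspace c
      · rw [pv_scan_space true hc, pvTokens_cons_space hc]
        exact ih r (by simp only [List.length_cons] at hn; omega)
      · have hc' : PySem.Chars.isspace c = false := by simpa using hc
        rw [pvTokens_cons_nonspace hc']
        simp only [pvF]
        by_cases hp : "mission_id=".toList <+: (c :: r).takeWhile (fun x => !PySem.Chars.isspace x)
        · rw [if_pos hp]
          have hpcs : "mission_id=".toList <+: (c :: r) :=
            hp.trans (List.takeWhile_prefix _)
          obtain ⟨ys, hys⟩ := hpcs
          have hsw : PySem.Chars.startswith (c :: r) ("mission_id=".toList) = true := by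
            simp only [PySem.Chars.startswith]
            exact List.isPrefixOf_iff_prefix.mpr ⟨ys, hys⟩
          have hPall : ("mission_id=".toList).takeWhile (fun x => !PySem.Chars.isspace x) =
              "mission_id=".toList := by decide
          have htake : (c :: r).takeWhile (fun x => !PySem.Chars.isspace x) =
              "mission_id=".toList ++ ys.takeWhile (fun x => !PySem.Chars.isspace x) := by
            rw [← hys, List.takeWhile_append, hPall]
            simp
          have hdropP : (c :: r).drop 11 = ys := by
            rw [← hys]
            have : ("mission_id=".toList).length = 11 := by decide
            rw [← this, List.drop_left]
          have hdropT : ((c :: r).takeWhile (fun x => !PySem.Chars.isspace x)).drop 11 =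
              ys.takeWhile (fun x => !PySem.Chars.isspace x) := by
            rw [htake]
            have : ("mission_id=".toList).length = 11 := by decide
            rw [← this, List.drop_left]
          simp only [pvBScan, hsw, Bool.true_and]
          rw [if_pos trivial]
          rw [pv_capture_eq, hdropP, hdropT]
          simp [List.isEmpty_iff]
        · rw [if_neg hp]
          have hsw : PySem.Chars.startswith (c :: r) ("mission_id=".toList) = false := by
            by_contra h
            have h2 : "mission_id=".toList <+: (c :: r) := by
              have := Bool.not_eq_false _ |>.mp h
              exact List.isPrefixOf_iff_prefix.mp (by simpa [PySem.Chars.startswith] using this)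
            obtain ⟨ys, hys⟩ := h2
            apply hp
            have hPall : ("mission_id=".toList).takeWhile (fun x => !PySem.Chars.isspace x) =
                "mission_id=".toList := by decide
            rw [← hys, List.takeWhile_append, hPall, if_pos rfl]
            exact ⟨ys.takeWhile (fun x => !PySem.Chars.isspace x), rfl⟩
          simp only [pvBScan]
          rw [hsw]
          simp only [Bool.and_false, Bool.false_eq_true, if_false, hc']
          have hsplitr : (r.takeWhile (fun x => !PySem.Chars.isspace x)) ++
              (r.dropWhile (fun x => !PySem.Chars.isspace x)) = r :=
            List.takeWhile_append_dropWhile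
          have h1 : pvBScan r false =
              pvBScan (r.dropWhile (fun x => !PySem.Chars.isspace x)) false := by
            conv_lhs => rw [← hsplitr]
            apply pv_scan_run
            intro x hx
            have := List.mem_takeWhile_imp hx
            simpa using this
          have h2 : pvBScan (r.dropWhile (fun x => !PySem.Chars.isspace x)) false =
              pvBScan (r.dropWhile (fun x => !PySem.Chars.isspace x)) true := by
            apply pv_scan_false_boundary
            cases hdw : r.dropWhile (fun x => !PySem.Chars.isspace x) with
            | nil => left; rfl
            | cons d r' =>
              right
              refine ⟨d, r', rfl, ?_⟩
              have := pv_dropWhile_head _ r d r' hdw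
              simpa using this
          have hdd : (c :: r).dropWhile (fun x => !PySem.Chars.isspace x) =
              r.dropWhile (fun x => !PySem.Chars.isspace x) := by
            simp [List.dropWhile, hc']
          rw [h1, h2, hdd]
          apply ih
          have := List.length_dropWhile_le (fun x => !PySem.Chars.isspace x) r
          simp only [List.length_cons] at hn
          omega

theorem pv_body_eq (text : Option String) :
    pvABody text = pvBScan (text.getD "").toList true := by
  unfold pvABody
  have hstrip : (PySem.Str.strip (text.getD "")).toList = PySem.Chars.strip (text.getD "").toList :=
    PySem.Str.toList_strip _
  rw [pv_scan_eq_F (text.getD "").toList.length _ le_rfl]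
  by_cases hv : PySem.Str.strip (text.getD "") = ""
  · rw [if_pos hv]
    have h0 : PySem.Chars.strip (text.getD "").toList = [] := by
      rw [← hstrip, hv]; rfl
    rw [← pvTokens_strip, h0, pvTokens_nil]
    rfl
  · rw [if_neg hv]
    have hsp : PySem.Str.split₀ (PySem.Str.strip (text.getD "")) =
        (pvTokens (text.getD "").toList).map String.ofList := by
      simp only [PySem.Str.split₀, hstrip, pv_split₀_eq, pvTokens_strip]
    rw [hsp, pv_aLoop_eq_F _ (pvTokens_nonspace (text.getD "").toList.length _ le_rfl)]

theorem command_mission_id_spec : Claim_equal_command_mission_id := by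
  intro text e _
  unfold Spec_command_mission_id
  cases e with
  | none =>
    simp only [command_mission_id, command_mission_id_alt]
    exact pv_body_eq text
  | some e =>
    simp only [command_mission_id, command_mission_id_alt]
    by_cases h1 : e = ""
    · simp [h1, pv_body_eq text]
    · by_cases h2 : PySem.Str.strip e = ""
      · simp [h1, h2, pv_body_eq text]
      · simp [h1, h2]
-- ===== VERDICT: command_mission_id_spec above proves Claim_equal_command_mission_id =====
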